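-- pv_equiv track=rewrite | github.com/newsnowlabs/dockside | cli/dockside_cli.py | _find_server
-- ===== SOURCE A (Python) =====
-- def _find_server(cfg, ref):
--     """Find a server entry by URL (exact) or nickname (case-insensitive)."""
--     servers = cfg.get('servers') or []
--     for s in servers:
--         if s.get('url') == ref:
--             return s
--     ref_lower = ref.lower()
--     for s in servers:
--         if (s.get('nickname') or '').lower() == ref_lower:
--             return s
--     return None
-- ===== SOURCE B (Python) =====
-- def _find_server(cfg, ref):
--     """Find a server entry by URL (exact) or nickname (case-insensitive)."""
--     servers = cfg.get('servers') or []
--     ref_lower = ref.lower()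
--     fallback = None
--     for s in servers:
--         if s.get('url') == ref:
--             return s
--         if fallback is None and (s.get('nickname') or '').lower() == ref_lower:
--             fallback = s
--     return fallback
-- ===== Notes on version B (the rewrite author's own statement) =====
-- stated objective: simpler
-- what changed: Replaced A's two sequential scans (URL pass, then nickname pass) by a single loop that returns on a URL match and remembers the first nickname match in a fallback variable returned after the loop.
import Mathlib
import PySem

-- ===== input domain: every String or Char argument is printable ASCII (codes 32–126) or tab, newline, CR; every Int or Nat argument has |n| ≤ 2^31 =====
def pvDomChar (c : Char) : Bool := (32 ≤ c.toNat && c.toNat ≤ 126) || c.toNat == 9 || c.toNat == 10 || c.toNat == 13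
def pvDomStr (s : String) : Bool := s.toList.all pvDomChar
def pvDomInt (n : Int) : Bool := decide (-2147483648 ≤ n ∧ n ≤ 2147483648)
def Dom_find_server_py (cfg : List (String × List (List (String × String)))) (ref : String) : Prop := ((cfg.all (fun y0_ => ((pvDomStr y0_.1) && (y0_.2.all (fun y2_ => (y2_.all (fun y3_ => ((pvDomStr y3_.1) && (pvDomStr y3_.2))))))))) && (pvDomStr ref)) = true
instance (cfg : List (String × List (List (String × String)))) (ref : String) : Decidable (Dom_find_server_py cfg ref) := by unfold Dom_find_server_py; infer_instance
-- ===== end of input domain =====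

-- B replaces A's two sequential scans with a single loop keeping a nickname-match fallback; objective: simpler (same cost).



-- ===== PORT A =====
-- A: first scan for an exact url match; then a second scan for a case-insensitive nickname match.
def findUrlScan (ref : String) : List (List (String × String)) → Option (List (String × String))
  | [] => none
  | s :: rest =>
    if PySem.Dict.get? (PySem.Dict.mk s) "url" = some ref then some s else findUrlScan ref rest

def findNickScan (refLower : String) : List (List (String × String)) → Option (List (String × String))
  | [] => none
  | s :: rest =>
    if PySem.Str.lower (PySem.Dict.getD (PySem.Dict.mk s) "nickname" "") = refLower then some s
    else findNickScan refLower rest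

def find_server_py (cfg : List (String × List (List (String × String)))) (ref : String) : Option (List (String × String)) :=
  let servers := match PySem.Dict.get? (PySem.Dict.mk cfg) "servers" with
    | none => []
    | some l => if l = [] then [] else l   -- Python `cfg.get('servers') or []`
  match findUrlScan ref servers with
  | some s => some s
  | none => findNickScan (PySem.Str.lower ref) servers

-- ===== PORT B =====
-- B: one loop; return on url match, keep the first nickname match as fallback.
def altScan (ref refLower : String) : List (List (String × String)) → Option (List (String × String)) → Option (List (String × String))
  | [], fallback => fallback
  | s :: rest, fallback =>
    if PySem.Dict.get? (PySem.Dict.mk s) "url" = some ref then some s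
    else
      altScan ref refLower rest
        (if fallback = none ∧ PySem.Str.lower (PySem.Dict.getD (PySem.Dict.mk s) "nickname" "") = refLower
         then some s else fallback)

def find_server_py_alt (cfg : List (String × List (List (String × String)))) (ref : String) : Option (List (String × String)) :=
  let servers := match PySem.Dict.get? (PySem.Dict.mk cfg) "servers" with
    | none => []
    | some l => if l = [] then [] else l
  altScan ref (PySem.Str.lower ref) servers none

-- ===== PRECONDITION & SPEC =====
def Spec_find_server_py (cfg : List (String × List (List (String × String)))) (ref : String) (out : Option (List (String × String))) : Prop := out = find_server_py_alt cfg ref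
instance (cfg : List (String × List (List (String × String)))) (ref : String) (out : Option (List (String × String))) : Decidable (Spec_find_server_py cfg ref out) := by unfold Spec_find_server_py; infer_instance

-- ===== CLAIM (what is proved, stated in full; the proofs are below) =====
def Claim_equal_find_server_py : Prop := ∀ (cfg : List (String × List (List (String × String)))) (ref : String), Dom_find_server_py cfg ref → Spec_find_server_py cfg ref (find_server_py cfg ref)

-- ===== LEMMAS AND PROOFS =====

-- ===== VERDICT (by name: the statement is the Claim_ definition above) =====
lemma altScan_eq (ref refLower : String) (l : List (List (String × String)))
    (fb : Option (List (String × String))) :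
    altScan ref refLower l fb =
      match findUrlScan ref l with
      | some s => some s
      | none => fb.or (findNickScan refLower l) := by
  induction l generalizing fb with
  | nil => cases fb <;> simp [altScan, findUrlScan, findNickScan]
  | cons s rest ih =>
    simp only [altScan, findUrlScan, findNickScan]
    by_cases hu : PySem.Dict.get? (PySem.Dict.mk s) "url" = some ref
    · simp [hu]
    · simp only [hu, if_false, ih]
      cases fb with
      | some f => simp
      | none =>
        by_cases hn : PySem.Str.lower (PySem.Dict.getD (PySem.Dict.mk s) "nickname" "") = refLower <;>
          simp [hn]

theorem find_server_py_spec : Claim_equal_find_server_py := by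
  intro cfg ref _
  unfold Spec_find_server_py find_server_py find_server_py_alt
  simp only [altScan_eq]
  cases findUrlScan ref _ <;> simp
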